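-- pv_equiv track=rewrite | github.com/IceMupppet/My-Local-Cinema | tv-scene-filenames.py | classify_tokens
-- ===== SOURCE A (Python) =====
-- QUALITY = {"2160P","1080P","720P","480P","540P"}
--
-- def normalize_token(tok: str) -> str:
--     t = tok.upper().replace(" ", "").replace("_","").replace("-", "")
--     if t in {"WEB", "WEBDL", "WEBRIP"}: return "WEB-DL"
--     if t in {"BLURAY","BRRIP"}: return "BluRay"
--     if t == "HDTV": return "HDTV"
--     if t == "AMZN": return "AMZN"
--     if t == "NF": return "NF"
--     if t in {"H264","H.264"}: return "H.264"
--     if t == "X264": return "x264"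
--     if t == "X265": return "x265"
--     if t == "HEVC": return "HEVC"
--     if t == "XVID": return "XviD"
--     if t in {"AAC","AC3","EAC3","DTS","FLAC"}: return t
--     if t.startswith("DDP"): return "DDP5.1"
--     if t == "TRUEHD": return "TrueHD"
--     if t in QUALITY: return t
--     return tok
--
-- def classify_tokens(tokens):
--     groups = {"quality":[], "providers":[], "sources":[], "audio":[], "video":[], "other":[]}
--     group_suffix = None
--     for tok in tokens:
--         if tok.startswith("-") and len(tok) > 1:
--             group_suffix = tok; continue
--         n = normalize_token(tok); u = n.upper()
--         if u in QUALITY: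
--             groups["quality"].append(n)
--         elif u in {"DSNP","AMZN","NF","HULU","MAX"}:
--             groups["providers"].append(n)
--         elif u in {"WEB-DL","BLURAY","BRRIP","HDTV","DVDRIP"}:
--             groups["sources"].append("BluRay" if u in {"BLURAY","BRRIP"} else ("WEB-DL" if u=="WEB-DL" else n))
--         elif u in {"AAC","AC3","DDP5.1","EAC3","TRUEHD","DTS","FLAC"}:
--             groups["audio"].append(n)
--         elif u in {"X264","X265","H.264","HEVC","XVID"} or n in {"x264","x265","XviD"}:
--             groups["video"].append(n)
--         else:
--             groups["other"].append(tok)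
--     return groups, group_suffix
-- ===== SOURCE B (Python) =====
-- _TABLE = {
--     "WEB": ("sources", "WEB-DL"), "WEBDL": ("sources", "WEB-DL"), "WEBRIP": ("sources", "WEB-DL"),
--     "BLURAY": ("sources", "BluRay"), "BRRIP": ("sources", "BluRay"),
--     "HDTV": ("sources", "HDTV"),
--     "AMZN": ("providers", "AMZN"), "NF": ("providers", "NF"),
--     "H264": ("video", "H.264"), "H.264": ("video", "H.264"),
--     "X264": ("video", "x264"), "X265": ("video", "x265"),
--     "HEVC": ("video", "HEVC"), "XVID": ("video", "XviD"),
--     "AAC": ("audio", "AAC"), "AC3": ("audio", "AC3"), "EAC3": ("audio", "EAC3"),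
--     "DTS": ("audio", "DTS"), "FLAC": ("audio", "FLAC"), "TRUEHD": ("audio", "TrueHD"),
--     "2160P": ("quality", "2160P"), "1080P": ("quality", "1080P"), "720P": ("quality", "720P"),
--     "480P": ("quality", "480P"), "540P": ("quality", "540P"),
-- }
--
-- def classify_tokens(tokens):
--     groups = {"quality": [], "providers": [], "sources": [], "audio": [], "video": [], "other": []}
--     group_suffix = None
--     for tok in tokens:
--         if tok.startswith("-") and len(tok) > 1:
--             group_suffix = tok
--             continue
--         t = tok.upper().replace(" ", "").replace("_", "").replace("-", "")
--         hit = _TABLE.get(t)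
--         if hit is not None:
--             cat, out = hit
--             groups[cat].append(out)
--         elif t.startswith("DDP"):
--             groups["audio"].append("DDP5.1")
--         else:
--             u = tok.upper()
--             if u in ("DSNP", "HULU", "MAX"):
--                 groups["providers"].append(tok)
--             elif u == "DVDRIP":
--                 groups["sources"].append(tok)
--             else:
--                 groups["other"].append(tok)
--     return groups, group_suffix
-- ===== Notes on version B (the rewrite author's own statement) =====
-- stated objective: simpler
-- what changed: Replaced the normalize_token helper plus the six-way if/elif classification cascade (which re-normalizes and re-uppercases each token) by a single module-level dispatch table keyed on the stripped-uppercase token, with one explicit DDP-prefix case and a tiny fallback for the three tokens (DSNP/HULU/MAX/DVDRIP) that A only matches un-stripped.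
import Mathlib
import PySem

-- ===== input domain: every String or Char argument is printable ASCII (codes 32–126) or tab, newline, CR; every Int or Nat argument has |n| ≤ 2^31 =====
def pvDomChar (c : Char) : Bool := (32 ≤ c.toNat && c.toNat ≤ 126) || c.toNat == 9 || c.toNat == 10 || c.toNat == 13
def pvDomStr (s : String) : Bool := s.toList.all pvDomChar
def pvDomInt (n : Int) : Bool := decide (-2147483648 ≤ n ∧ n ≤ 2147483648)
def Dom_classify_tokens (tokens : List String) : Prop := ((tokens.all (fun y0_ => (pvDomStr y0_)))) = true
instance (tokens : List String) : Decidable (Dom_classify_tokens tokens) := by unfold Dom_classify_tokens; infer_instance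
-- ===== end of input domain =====

-- B replaces normalize_token plus the if/elif classification cascade by a single
-- module-level dispatch table keyed on the stripped-uppercase token (objective: simpler).

-- shared by both ports: tok.upper().replace(" ", "").replace("_","").replace("-", "")
def pvStrip (tok : String) : String :=
  PySem.Str.replace (PySem.Str.replace (PySem.Str.replace (PySem.Str.upper tok) " " "") "_" "") "-" ""

-- ===== PORT A =====
def QUALITY : List String := ["2160P", "1080P", "720P", "480P", "540P"]

def normalize_token (tok : String) : String :=
  let t := pvStrip tok
  if t = "WEB" ∨ t = "WEBDL" ∨ t = "WEBRIP" then "WEB-DL"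
  else if t = "BLURAY" ∨ t = "BRRIP" then "BluRay"
  else if t = "HDTV" then "HDTV"
  else if t = "AMZN" then "AMZN"
  else if t = "NF" then "NF"
  else if t = "H264" ∨ t = "H.264" then "H.264"
  else if t = "X264" then "x264"
  else if t = "X265" then "x265"
  else if t = "HEVC" then "HEVC"
  else if t = "XVID" then "XviD"
  else if t = "AAC" ∨ t = "AC3" ∨ t = "EAC3" ∨ t = "DTS" ∨ t = "FLAC" then t
  else if PySem.Str.startswith t "DDP" then "DDP5.1"
  else if t = "TRUEHD" then "TrueHD"
  else if t ∈ QUALITY then t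
  else tok

def pvInitGroups : PySem.Dict String (List String) :=
  PySem.Dict.mk [("quality", []), ("providers", []), ("sources", []), ("audio", []), ("video", []), ("other", [])]

def stepA (st : PySem.Dict String (List String) × Option String) (tok : String) :
    PySem.Dict String (List String) × Option String :=
  if PySem.Str.startswith tok "-" ∧ PySem.Str.len tok > 1 then (st.1, some tok)
  else
    let n := normalize_token tok
    let u := PySem.Str.upper n
    if u ∈ QUALITY then (st.1.modify "quality" [] (· ++ [n]), st.2)
    else if u = "DSNP" ∨ u = "AMZN" ∨ u = "NF" ∨ u = "HULU" ∨ u = "MAX" then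
      (st.1.modify "providers" [] (· ++ [n]), st.2)
    else if u = "WEB-DL" ∨ u = "BLURAY" ∨ u = "BRRIP" ∨ u = "HDTV" ∨ u = "DVDRIP" then
      (st.1.modify "sources" [] (· ++ [if u = "BLURAY" ∨ u = "BRRIP" then "BluRay"
                                       else if u = "WEB-DL" then "WEB-DL" else n]), st.2)
    else if u = "AAC" ∨ u = "AC3" ∨ u = "DDP5.1" ∨ u = "EAC3" ∨ u = "TRUEHD" ∨ u = "DTS" ∨ u = "FLAC" then
      (st.1.modify "audio" [] (· ++ [n]), st.2)
    else if u = "X264" ∨ u = "X265" ∨ u = "H.264" ∨ u = "HEVC" ∨ u = "XVID" ∨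
            n = "x264" ∨ n = "x265" ∨ n = "XviD" then
      (st.1.modify "video" [] (· ++ [n]), st.2)
    else (st.1.modify "other" [] (· ++ [tok]), st.2)

def classify_tokens (tokens : List String) : (List (String × List String)) × Option String :=
  let r := tokens.foldl stepA (pvInitGroups, none)
  (r.1.items, r.2)

-- ===== PORT B =====
def TABLE : PySem.Dict String (String × String) :=
  PySem.Dict.mk [
    ("WEB", ("sources", "WEB-DL")), ("WEBDL", ("sources", "WEB-DL")), ("WEBRIP", ("sources", "WEB-DL")),
    ("BLURAY", ("sources", "BluRay")), ("BRRIP", ("sources", "BluRay")),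
    ("HDTV", ("sources", "HDTV")),
    ("AMZN", ("providers", "AMZN")), ("NF", ("providers", "NF")),
    ("H264", ("video", "H.264")), ("H.264", ("video", "H.264")),
    ("X264", ("video", "x264")), ("X265", ("video", "x265")),
    ("HEVC", ("video", "HEVC")), ("XVID", ("video", "XviD")),
    ("AAC", ("audio", "AAC")), ("AC3", ("audio", "AC3")), ("EAC3", ("audio", "EAC3")),
    ("DTS", ("audio", "DTS")), ("FLAC", ("audio", "FLAC")), ("TRUEHD", ("audio", "TrueHD")),
    ("2160P", ("quality", "2160P")), ("1080P", ("quality", "1080P")), ("720P", ("quality", "720P")),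
    ("480P", ("quality", "480P")), ("540P", ("quality", "540P"))]

def stepB (st : PySem.Dict String (List String) × Option String) (tok : String) :
    PySem.Dict String (List String) × Option String :=
  if PySem.Str.startswith tok "-" ∧ PySem.Str.len tok > 1 then (st.1, some tok)
  else
    let t := pvStrip tok
    match TABLE.get? t with
    | some (cat, out) => (st.1.modify cat [] (· ++ [out]), st.2)
    | none =>
      if PySem.Str.startswith t "DDP" then (st.1.modify "audio" [] (· ++ ["DDP5.1"]), st.2)
      else
        let u := PySem.Str.upper tok
        if u = "DSNP" ∨ u = "HULU" ∨ u = "MAX" then (st.1.modify "providers" [] (· ++ [tok]), st.2)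
        else if u = "DVDRIP" then (st.1.modify "sources" [] (· ++ [tok]), st.2)
        else (st.1.modify "other" [] (· ++ [tok]), st.2)

def classify_tokens_alt (tokens : List String) : (List (String × List String)) × Option String :=
  let r := tokens.foldl stepB (pvInitGroups, none)
  (r.1.items, r.2)

-- ===== PRECONDITION & SPEC =====
def Spec_classify_tokens (tokens : List String) (out : (List (String × List String)) × Option String) : Prop := out = classify_tokens_alt tokens
instance (tokens : List String) (out : (List (String × List String)) × Option String) : Decidable (Spec_classify_tokens tokens out) := by unfold Spec_classify_tokens; infer_instance

-- ===== CLAIM (what is proved, stated in full; the proofs are below) =====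
def Claim_equal_classify_tokens : Prop := ∀ (tokens : List String), Dom_classify_tokens tokens → Spec_classify_tokens tokens (classify_tokens tokens)

-- ===== LEMMAS AND PROOFS =====

theorem step_eq (st : PySem.Dict String (List String) × Option String) (tok : String) :
    stepA st tok = stepB st tok := by
  by_cases hs : PySem.Str.startswith tok "-" ∧ PySem.Str.len tok > 1
  · simp only [stepA, stepB]; rw [if_pos hs, if_pos hs]
  simp only [stepA, stepB]
  rw [if_neg hs, if_neg hs]
  by_cases h0 : pvStrip tok = "WEB"
  · have hn : normalize_token tok = "WEB-DL" := by simp only [normalize_token]; rw [h0]; simp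
    have hu : PySem.Str.upper "WEB-DL" = "WEB-DL" := by decide
    have hg : TABLE.get? (pvStrip tok) = some ("sources", "WEB-DL") := by rw [h0]; decide
    simp [hn, hu, hg, QUALITY]
  by_cases h1 : pvStrip tok = "WEBDL"
  · have hn : normalize_token tok = "WEB-DL" := by simp only [normalize_token]; rw [h1]; simp
    have hu : PySem.Str.upper "WEB-DL" = "WEB-DL" := by decide
    have hg : TABLE.get? (pvStrip tok) = some ("sources", "WEB-DL") := by rw [h1]; decide
    simp [hn, hu, hg, QUALITY]
  by_cases h2 : pvStrip tok = "WEBRIP"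
  · have hn : normalize_token tok = "WEB-DL" := by simp only [normalize_token]; rw [h2]; simp
    have hu : PySem.Str.upper "WEB-DL" = "WEB-DL" := by decide
    have hg : TABLE.get? (pvStrip tok) = some ("sources", "WEB-DL") := by rw [h2]; decide
    simp [hn, hu, hg, QUALITY]
  by_cases h3 : pvStrip tok = "BLURAY"
  · have hn : normalize_token tok = "BluRay" := by simp only [normalize_token]; rw [h3]; simp
    have hu : PySem.Str.upper "BluRay" = "BLURAY" := by decide
    have hg : TABLE.get? (pvStrip tok) = some ("sources", "BluRay") := by rw [h3]; decide
    simp [hn, hu, hg, QUALITY]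
  by_cases h4 : pvStrip tok = "BRRIP"
  · have hn : normalize_token tok = "BluRay" := by simp only [normalize_token]; rw [h4]; simp
    have hu : PySem.Str.upper "BluRay" = "BLURAY" := by decide
    have hg : TABLE.get? (pvStrip tok) = some ("sources", "BluRay") := by rw [h4]; decide
    simp [hn, hu, hg, QUALITY]
  by_cases h5 : pvStrip tok = "HDTV"
  · have hn : normalize_token tok = "HDTV" := by simp only [normalize_token]; rw [h5]; simp
    have hu : PySem.Str.upper "HDTV" = "HDTV" := by decide
    have hg : TABLE.get? (pvStrip tok) = some ("sources", "HDTV") := by rw [h5]; decide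
    simp [hn, hu, hg, QUALITY]
  by_cases h6 : pvStrip tok = "AMZN"
  · have hn : normalize_token tok = "AMZN" := by simp only [normalize_token]; rw [h6]; simp
    have hu : PySem.Str.upper "AMZN" = "AMZN" := by decide
    have hg : TABLE.get? (pvStrip tok) = some ("providers", "AMZN") := by rw [h6]; decide
    simp [hn, hu, hg, QUALITY]
  by_cases h7 : pvStrip tok = "NF"
  · have hn : normalize_token tok = "NF" := by simp only [normalize_token]; rw [h7]; simp
    have hu : PySem.Str.upper "NF" = "NF" := by decide
    have hg : TABLE.get? (pvStrip tok) = some ("providers", "NF") := by rw [h7]; decide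
    simp [hn, hu, hg, QUALITY]
  by_cases h8 : pvStrip tok = "H264"
  · have hn : normalize_token tok = "H.264" := by simp only [normalize_token]; rw [h8]; simp
    have hu : PySem.Str.upper "H.264" = "H.264" := by decide
    have hg : TABLE.get? (pvStrip tok) = some ("video", "H.264") := by rw [h8]; decide
    simp [hn, hu, hg, QUALITY]
  by_cases h9 : pvStrip tok = "H.264"
  · have hn : normalize_token tok = "H.264" := by simp only [normalize_token]; rw [h9]; simp
    have hu : PySem.Str.upper "H.264" = "H.264" := by decide
    have hg : TABLE.get? (pvStrip tok) = some ("video", "H.264") := by rw [h9]; decide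
    simp [hn, hu, hg, QUALITY]
  by_cases h10 : pvStrip tok = "X264"
  · have hn : normalize_token tok = "x264" := by simp only [normalize_token]; rw [h10]; simp
    have hu : PySem.Str.upper "x264" = "X264" := by decide
    have hg : TABLE.get? (pvStrip tok) = some ("video", "x264") := by rw [h10]; decide
    simp [hn, hu, hg, QUALITY]
  by_cases h11 : pvStrip tok = "X265"
  · have hn : normalize_token tok = "x265" := by simp only [normalize_token]; rw [h11]; simp
    have hu : PySem.Str.upper "x265" = "X265" := by decide
    have hg : TABLE.get? (pvStrip tok) = some ("video", "x265") := by rw [h11]; decide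
    simp [hn, hu, hg, QUALITY]
  by_cases h12 : pvStrip tok = "HEVC"
  · have hn : normalize_token tok = "HEVC" := by simp only [normalize_token]; rw [h12]; simp
    have hu : PySem.Str.upper "HEVC" = "HEVC" := by decide
    have hg : TABLE.get? (pvStrip tok) = some ("video", "HEVC") := by rw [h12]; decide
    simp [hn, hu, hg, QUALITY]
  by_cases h13 : pvStrip tok = "XVID"
  · have hn : normalize_token tok = "XviD" := by simp only [normalize_token]; rw [h13]; simp
    have hu : PySem.Str.upper "XviD" = "XVID" := by decide
    have hg : TABLE.get? (pvStrip tok) = some ("video", "XviD") := by rw [h13]; decide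
    simp [hn, hu, hg, QUALITY]
  by_cases h14 : pvStrip tok = "AAC"
  · have hn : normalize_token tok = "AAC" := by simp only [normalize_token]; rw [h14]; simp
    have hu : PySem.Str.upper "AAC" = "AAC" := by decide
    have hg : TABLE.get? (pvStrip tok) = some ("audio", "AAC") := by rw [h14]; decide
    simp [hn, hu, hg, QUALITY]
  by_cases h15 : pvStrip tok = "AC3"
  · have hn : normalize_token tok = "AC3" := by simp only [normalize_token]; rw [h15]; simp
    have hu : PySem.Str.upper "AC3" = "AC3" := by decide
    have hg : TABLE.get? (pvStrip tok) = some ("audio", "AC3") := by rw [h15]; decide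
    simp [hn, hu, hg, QUALITY]
  by_cases h16 : pvStrip tok = "EAC3"
  · have hn : normalize_token tok = "EAC3" := by simp only [normalize_token]; rw [h16]; simp
    have hu : PySem.Str.upper "EAC3" = "EAC3" := by decide
    have hg : TABLE.get? (pvStrip tok) = some ("audio", "EAC3") := by rw [h16]; decide
    simp [hn, hu, hg, QUALITY]
  by_cases h17 : pvStrip tok = "DTS"
  · have hn : normalize_token tok = "DTS" := by simp only [normalize_token]; rw [h17]; simp
    have hu : PySem.Str.upper "DTS" = "DTS" := by decide
    have hg : TABLE.get? (pvStrip tok) = some ("audio", "DTS") := by rw [h17]; decide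
    simp [hn, hu, hg, QUALITY]
  by_cases h18 : pvStrip tok = "FLAC"
  · have hn : normalize_token tok = "FLAC" := by simp only [normalize_token]; rw [h18]; simp
    have hu : PySem.Str.upper "FLAC" = "FLAC" := by decide
    have hg : TABLE.get? (pvStrip tok) = some ("audio", "FLAC") := by rw [h18]; decide
    simp [hn, hu, hg, QUALITY]
  by_cases h19 : pvStrip tok = "TRUEHD"
  · have hn : normalize_token tok = "TrueHD" := by simp only [normalize_token]; rw [h19]; simp [PySem.Chars.startswith]
    have hu : PySem.Str.upper "TrueHD" = "TRUEHD" := by decide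
    have hg : TABLE.get? (pvStrip tok) = some ("audio", "TrueHD") := by rw [h19]; decide
    simp [hn, hu, hg, QUALITY]
  by_cases h20 : pvStrip tok = "2160P"
  · have hn : normalize_token tok = "2160P" := by simp only [normalize_token]; rw [h20]; simp [QUALITY, PySem.Chars.startswith]
    have hu : PySem.Str.upper "2160P" = "2160P" := by decide
    have hg : TABLE.get? (pvStrip tok) = some ("quality", "2160P") := by rw [h20]; decide
    simp [hn, hu, hg, QUALITY]
  by_cases h21 : pvStrip tok = "1080P"
  · have hn : normalize_token tok = "1080P" := by simp only [normalize_token]; rw [h21]; simp [QUALITY, PySem.Chars.startswith]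
    have hu : PySem.Str.upper "1080P" = "1080P" := by decide
    have hg : TABLE.get? (pvStrip tok) = some ("quality", "1080P") := by rw [h21]; decide
    simp [hn, hu, hg, QUALITY]
  by_cases h22 : pvStrip tok = "720P"
  · have hn : normalize_token tok = "720P" := by simp only [normalize_token]; rw [h22]; simp [QUALITY, PySem.Chars.startswith]
    have hu : PySem.Str.upper "720P" = "720P" := by decide
    have hg : TABLE.get? (pvStrip tok) = some ("quality", "720P") := by rw [h22]; decide
    simp [hn, hu, hg, QUALITY]
  by_cases h23 : pvStrip tok = "480P"
  · have hn : normalize_token tok = "480P" := by simp only [normalize_token]; rw [h23]; simp [QUALITY, PySem.Chars.startswith]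
    have hu : PySem.Str.upper "480P" = "480P" := by decide
    have hg : TABLE.get? (pvStrip tok) = some ("quality", "480P") := by rw [h23]; decide
    simp [hn, hu, hg, QUALITY]
  by_cases h24 : pvStrip tok = "540P"
  · have hn : normalize_token tok = "540P" := by simp only [normalize_token]; rw [h24]; simp [QUALITY, PySem.Chars.startswith]
    have hu : PySem.Str.upper "540P" = "540P" := by decide
    have hg : TABLE.get? (pvStrip tok) = some ("quality", "540P") := by rw [h24]; decide
    simp [hn, hu, hg, QUALITY]
  have hT : TABLE.get? (pvStrip tok) = none := by
    simp [TABLE, PySem.Dict.get?]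
    exact ⟨Ne.symm h0, Ne.symm h1, Ne.symm h2, Ne.symm h3, Ne.symm h4, Ne.symm h5, Ne.symm h6, Ne.symm h7, Ne.symm h8, Ne.symm h9, Ne.symm h10, Ne.symm h11, Ne.symm h12, Ne.symm h13, Ne.symm h14, Ne.symm h15, Ne.symm h16, Ne.symm h17, Ne.symm h18, Ne.symm h19, Ne.symm h20, Ne.symm h21, Ne.symm h22, Ne.symm h23, Ne.symm h24⟩
  by_cases hd : PySem.Chars.startswith (pvStrip tok).toList ['D', 'D', 'P'] = true
  · have hn : normalize_token tok = "DDP5.1" := by simp [normalize_token, h0, h1, h2, h3, h4, h5, h6, h7, h8, h9, h10, h11, h12, h13, h14, h15, h16, h17, h18, hd]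
    have hu : PySem.Str.upper "DDP5.1" = "DDP5.1" := by decide
    simp [hn, hu, hd, hT, QUALITY]
  have hn : normalize_token tok = tok := by simp [normalize_token, QUALITY, h0, h1, h2, h3, h4, h5, h6, h7, h8, h9, h10, h11, h12, h13, h14, h15, h16, h17, h18, h19, h20, h21, h22, h23, h24, hd]
  have hstrip : ∀ C : String, PySem.Str.upper tok = C →
      pvStrip tok = PySem.Str.replace (PySem.Str.replace (PySem.Str.replace C " " "") "_" "") "-" "" := by
    intro C hC; unfold pvStrip; rw [hC]
  by_cases hu0 : PySem.Str.upper tok = "2160P"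
  · exact absurd (by rw [hstrip _ hu0]; decide) h20
  by_cases hu1 : PySem.Str.upper tok = "1080P"
  · exact absurd (by rw [hstrip _ hu1]; decide) h21
  by_cases hu2 : PySem.Str.upper tok = "720P"
  · exact absurd (by rw [hstrip _ hu2]; decide) h22
  by_cases hu3 : PySem.Str.upper tok = "480P"
  · exact absurd (by rw [hstrip _ hu3]; decide) h23
  by_cases hu4 : PySem.Str.upper tok = "540P"
  · exact absurd (by rw [hstrip _ hu4]; decide) h24
  by_cases hu5 : PySem.Str.upper tok = "AMZN"
  · exact absurd (by rw [hstrip _ hu5]; decide) h6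
  by_cases hu6 : PySem.Str.upper tok = "NF"
  · exact absurd (by rw [hstrip _ hu6]; decide) h7
  by_cases hu7 : PySem.Str.upper tok = "WEB-DL"
  · exact absurd (by rw [hstrip _ hu7]; decide) h1
  by_cases hu8 : PySem.Str.upper tok = "BLURAY"
  · exact absurd (by rw [hstrip _ hu8]; decide) h3
  by_cases hu9 : PySem.Str.upper tok = "BRRIP"
  · exact absurd (by rw [hstrip _ hu9]; decide) h4
  by_cases hu10 : PySem.Str.upper tok = "HDTV"
  · exact absurd (by rw [hstrip _ hu10]; decide) h5
  by_cases hu11 : PySem.Str.upper tok = "AAC"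
  · exact absurd (by rw [hstrip _ hu11]; decide) h14
  by_cases hu12 : PySem.Str.upper tok = "AC3"
  · exact absurd (by rw [hstrip _ hu12]; decide) h15
  by_cases hu13 : PySem.Str.upper tok = "DDP5.1"
  · exact absurd (by rw [hstrip _ hu13]; decide) hd
  by_cases hu14 : PySem.Str.upper tok = "EAC3"
  · exact absurd (by rw [hstrip _ hu14]; decide) h16
  by_cases hu15 : PySem.Str.upper tok = "TRUEHD"
  · exact absurd (by rw [hstrip _ hu15]; decide) h19
  by_cases hu16 : PySem.Str.upper tok = "DTS"
  · exact absurd (by rw [hstrip _ hu16]; decide) h17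
  by_cases hu17 : PySem.Str.upper tok = "FLAC"
  · exact absurd (by rw [hstrip _ hu17]; decide) h18
  by_cases hu18 : PySem.Str.upper tok = "X264"
  · exact absurd (by rw [hstrip _ hu18]; decide) h10
  by_cases hu19 : PySem.Str.upper tok = "X265"
  · exact absurd (by rw [hstrip _ hu19]; decide) h11
  by_cases hu20 : PySem.Str.upper tok = "H.264"
  · exact absurd (by rw [hstrip _ hu20]; decide) h9
  by_cases hu21 : PySem.Str.upper tok = "HEVC"
  · exact absurd (by rw [hstrip _ hu21]; decide) h12
  by_cases hu22 : PySem.Str.upper tok = "XVID"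
  · exact absurd (by rw [hstrip _ hu22]; decide) h13
  by_cases ht23 : tok = "x264"
  · exact absurd (by rw [ht23]; decide) h10
  by_cases ht24 : tok = "x265"
  · exact absurd (by rw [ht24]; decide) h11
  by_cases ht25 : tok = "XviD"
  · exact absurd (by rw [ht25]; decide) h13
  by_cases hu26 : PySem.Str.upper tok = "DSNP"
  · simp [hn, hd, hT, hu26, QUALITY]
  by_cases hu27 : PySem.Str.upper tok = "HULU"
  · simp [hn, hd, hT, hu27, QUALITY]
  by_cases hu28 : PySem.Str.upper tok = "MAX"
  · simp [hn, hd, hT, hu28, QUALITY]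
  by_cases hu29 : PySem.Str.upper tok = "DVDRIP"
  · simp [hn, hd, hT, hu29, QUALITY]
  simp [hn, hd, hT, hu0, hu1, hu2, hu3, hu4, hu5, hu6, hu7, hu8, hu9, hu10, hu11, hu12, hu13, hu14, hu15, hu16, hu17, hu18, hu19, hu20, hu21, hu22, ht23, ht24, ht25, hu26, hu27, hu28, hu29, QUALITY]


-- ===== VERDICT (by name: the statement is the Claim_ definition above) =====
theorem classify_tokens_spec : Claim_equal_classify_tokens := by
  intro tokens _
  unfold Spec_classify_tokens classify_tokens classify_tokens_alt
  have h : stepA = stepB := funext fun st => funext fun tok => step_eq st tok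
  rw [h]
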